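/- GENERATED by farm/mkstatement.py from design/units.tsv (unit `vorbis_decode_packet_rest.7`) and the assertions of Vorbis/Spec/PacketRest.lean — do not edit.
   THE STATEMENT of the proof unit `vorbis_decode_packet_rest.7`: segment 7 of `vorbis_decode_packet_rest` (5 instructions; entries 0x1112b5,0x1112d0;
   exits 0x1112d4; ranges 0x1112b5-0x1112d0)
   takes each of its entry assertions to one of its exit assertions (`Vorbis.Spec.vorbis_decode_packet_rest.Seg7`), given the contracts of its callees.
   What the names mean: Vorbis/Spec/Basic.lean (the shared hypotheses), Vorbis/Spec/PacketRest.lean (the assertions). The theorem to prove: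
   `theorem vorbis_decode_packet_rest_7_ok : Vorbis.Spec.vorbis_decode_packet_rest_7.Statement`. -/
import Vorbis.Spec.PacketRest
namespace Vorbis.Spec.vorbis_decode_packet_rest_7
open X86 X86.User Asan

/-- The statement of unit `vorbis_decode_packet_rest.7`. -/
def Statement : Prop :=
  ∀ (Lay : Layout) (_hLay : Lay.hi = 0x1000000) (μ : Microarch) (_hμ : UserX.MicroOK μ) (u₀ : State)
    (_hcode : HasCodeNat Lay u₀ Vorbis.L.vorbis_decode_packet_rest.entry Vorbis.Code.code_vorbis_decode_packet_rest.nat Vorbis.L.vorbis_decode_packet_rest.size)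
    (_h_asan_store4_noabort : Asan.SmallCheck Lay μ Vorbis.WayInv (Vorbis.CodeOK u₀) [.rax, .rcx, .rdx] 4 Vorbis.L.__asan_store4_noabort.entry),
    Vorbis.Spec.vorbis_decode_packet_rest.Seg7 Lay μ u₀

end Vorbis.Spec.vorbis_decode_packet_rest_7
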